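-- pv_equiv track=rewrite | github.com/NhanDinhVan/Data-Structures-and-Algorithms_Python | bit_manipulation/_2595_Leetcode_Number_of_Even_and_Odd_Bits.py | evenOddBit
-- ===== SOURCE A (Python) =====
-- from typing import List
--
-- def evenOddBit(n: int) -> List[int]:
--     ans = [0, 0]
--     idx = 0
--     while n > 0:
--         cur = n & 1
--         if cur == 1 :
--             ans[idx % 2] += 1
--         idx += 1
--         n >>= 1
--     return ans
-- ===== SOURCE B (Python) =====
-- def evenOddBit(n: int):
--     # Mask-and-popcount: no per-bit loop.
--     if n <= 0:
--         return [0, 0]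
--     mask = (4 ** n.bit_length() - 1) // 3  # 0b0101...01, wide enough for n
--     return [(n & mask).bit_count(), ((n >> 1) & mask).bit_count()]
-- ===== Notes on version B (the rewrite author's own statement) =====
-- stated objective: faster
-- what changed: Replaces the per-bit while loop with index-parity bookkeeping by a closed-form mask-and-popcount: AND with the 0b0101...01 mask selects the even-indexed bits (and of n>>1 the odd-indexed ones) and int.bit_count counts them, with non-positive n returning [0,0] directly.
import Mathlib
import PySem

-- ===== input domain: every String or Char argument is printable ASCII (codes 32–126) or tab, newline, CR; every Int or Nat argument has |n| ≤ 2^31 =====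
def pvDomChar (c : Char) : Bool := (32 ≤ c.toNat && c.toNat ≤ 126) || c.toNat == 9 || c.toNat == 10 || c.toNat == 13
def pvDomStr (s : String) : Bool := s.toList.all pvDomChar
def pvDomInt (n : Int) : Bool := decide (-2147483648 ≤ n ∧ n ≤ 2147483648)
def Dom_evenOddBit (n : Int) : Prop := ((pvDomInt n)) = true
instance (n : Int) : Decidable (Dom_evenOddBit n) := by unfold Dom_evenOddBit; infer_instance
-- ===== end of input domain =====

-- B replaces A's per-bit while loop by a closed-form mask-and-popcount (no per-bit iteration).

-- ===== PORT A =====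
-- the while loop of A; terminates because n >>> 1 halves a positive n
def evenOddBitLoop (n : Int) (ans : List Int) (idx : Int) : List Int :=
  if _h : n > 0 then
    let cur := PySem.Int.band n 1
    -- ans[idx % 2] += 1 : idx % 2 is always a valid index of the 2-element list, so pyGetD/pySetD are exact
    let ans' := if cur == 1 then
        PySem.List.pySetD ans (PySem.Int.mod idx 2) (PySem.List.pyGetD ans (PySem.Int.mod idx 2) 0 + 1)
      else ans
    evenOddBitLoop (n >>> (1 : Nat)) ans' (idx + 1)
  else ans
termination_by n.toNat
decreasing_by
  have : n >>> (1 : Nat) = n / 2 := by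
    have h := Int.shiftRight_eq_div_pow n 1
    simpa using h
  omega

def evenOddBit (n : Int) : List Int :=
  evenOddBitLoop n [0, 0] 0

-- ===== PORT B =====
def evenOddBit_alt (n : Int) : List Int :=
  if n ≤ 0 then [0, 0]
  else
    let mask := PySem.Int.floordiv (4 ^ PySem.Int.bitLength n - 1) 3
    [(PySem.Int.bitCount (PySem.Int.band n mask) : Int),
     (PySem.Int.bitCount (PySem.Int.band (n >>> (1 : Nat)) mask) : Int)]

-- ===== PRECONDITION & SPEC =====
def Spec_evenOddBit (n : Int) (out : List Int) : Prop := out = evenOddBit_alt n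
instance (n : Int) (out : List Int) : Decidable (Spec_evenOddBit n out) := by unfold Spec_evenOddBit; infer_instance

-- ===== CLAIM (what is proved, stated in full; the proofs are below) =====
def Claim_equal_evenOddBit : Prop := ∀ (n : Int), Dom_evenOddBit n → Spec_evenOddBit n (evenOddBit n)

-- ===== LEMMAS AND PROOFS =====

-- reference pair (#set even-index bits, #set odd-index bits) of a natural number
def pvEO (m : Nat) : Nat × Nat :=
  if m = 0 then (0, 0) else (m % 2 + (pvEO (m / 2)).2, (pvEO (m / 2)).1)
termination_by m
decreasing_by exact Nat.div_lt_self (Nat.pos_of_ne_zero (by assumption)) (by omega)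

lemma pvEO_fst (m : Nat) : (pvEO m).1 = m % 2 + (pvEO (m / 2)).2 := by
  rw [pvEO]; split
  · subst ‹m = 0›; rw [pvEO]; simp
  · rfl

lemma pvEO_snd (m : Nat) : (pvEO m).2 = (pvEO (m / 2)).1 := by
  rw [pvEO]; split
  · subst ‹m = 0›; rw [pvEO]; simp
  · rfl

-- the alternating mask 0b0101...01 with k ones
def pvAlt : Nat → Nat
  | 0 => 0
  | k + 1 => 4 * pvAlt k + 1

lemma pv_pow4_mod3 (k : Nat) : 4 ^ k % 3 = 1 := by
  induction k with
  | zero => rfl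
  | succ k ih => rw [pow_succ, Nat.mul_mod, ih]

lemma pvAlt_eq (k : Nat) : (4 ^ k - 1) / 3 = pvAlt k := by
  induction k with
  | zero => rfl
  | succ k ih =>
    have h := pv_pow4_mod3 k
    have hp : 1 ≤ 4 ^ k := Nat.one_le_pow _ _ (by omega)
    rw [pvAlt, ← ih, pow_succ]
    omega

lemma pv_shiftRight_one (x : Nat) : x >>> 1 = x / 2 := Nat.shiftRight_one x

-- bit_count of m AND the alternating mask = number of set even-index bits of m
lemma pvB_count : ∀ (k m : Nat), m < 4 ^ k →
    PySem.Int.bitCount ((m &&& pvAlt k : Nat) : Int) = (pvEO m).1 := by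
  intro k
  induction k with
  | zero =>
    intro m hm
    have : m = 0 := by simpa using hm
    subst this
    rw [pvEO]
    norm_num [pvAlt]
  | succ k ih =>
    intro m hm
    have hc : pvAlt (k + 1) = 4 * pvAlt k + 1 := rfl
    set c := pvAlt (k + 1) with hcdef
    set t := m &&& c with htdef
    -- low bit of t is the low bit of m
    have h1 : t % 2 = m % 2 := by
      have e1 : c &&& 1 = 1 := by
        rw [Nat.and_one_is_mod]; omega
      calc t % 2 = t &&& 1 := (Nat.and_one_is_mod t).symm
        _ = m &&& (c &&& 1) := Nat.and_assoc m c 1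
        _ = m &&& 1 := by rw [e1]
        _ = m % 2 := Nat.and_one_is_mod m
    have hdiv : t / 2 = (m / 2) &&& (2 * pvAlt k) := by
      have := Nat.shiftRight_and_distrib (a := m) (b := c) (i := 1)
      rw [pv_shiftRight_one, pv_shiftRight_one, pv_shiftRight_one] at this
      rw [htdef, this]
      congr 1
      omega
    have h2 : t / 2 % 2 = 0 := by
      have e2 : (2 * pvAlt k) &&& 1 = 0 := by
        rw [Nat.and_one_is_mod]; omega
      calc t / 2 % 2 = t / 2 &&& 1 := (Nat.and_one_is_mod _).symm
        _ = (m / 2) &&& ((2 * pvAlt k) &&& 1) := by rw [hdiv]; exact Nat.and_assoc _ _ _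
        _ = 0 := by rw [e2]; exact Nat.and_zero _
    have h3 : t / 2 / 2 = (m / 4) &&& pvAlt k := by
      have := Nat.shiftRight_and_distrib (a := m / 2) (b := 2 * pvAlt k) (i := 1)
      rw [pv_shiftRight_one, pv_shiftRight_one, pv_shiftRight_one] at this
      rw [hdiv, this, Nat.div_div_eq_div_mul]
      congr 1
      omega
    have hm4 : m / 4 < 4 ^ k := by
      rw [Nat.div_lt_iff_lt_mul (by omega)]
      calc m < 4 ^ (k + 1) := hm
        _ = 4 ^ k * 4 := by ring
    have ihm := ih (m / 4) hm4
    -- unfold the reference pair twice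
    have hEO : (pvEO m).1 = m % 2 + (pvEO (m / 4)).1 := by
      rw [pvEO_fst, pvEO_snd, Nat.div_div_eq_div_mul]
    rw [hEO, ← ihm, ← h3, ← h1]
    by_cases ht : t = 0
    · simp [ht]
    · rw [PySem.Int.bitCount_natCast (Nat.pos_of_ne_zero ht)]
      by_cases ht2 : t / 2 = 0
      · simp [ht2]
      · rw [PySem.Int.bitCount_natCast (Nat.pos_of_ne_zero ht2), h2]
        simp

lemma pv_int_shiftRight_natCast (m : Nat) : ((m : Int) >>> (1 : Nat)) = ((m / 2 : Nat) : Int) := by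
  have h := Int.shiftRight_eq_div_pow (m : Int) 1
  rw [h]
  omega

lemma pv_mod_natCast (m : Nat) : PySem.Int.mod (m : Int) 2 = ((m % 2 : Nat) : Int) := by
  unfold PySem.Int.mod
  rw [Int.fmod_eq_emod, if_pos (Or.inl (by omega))]
  omega

-- the loop of A computes the reference pair, added into whichever slots idx's parity selects
lemma pvLoop_eq : ∀ (m : Nat) (a b idx : Int), 0 ≤ idx →
    evenOddBitLoop (m : Int) [a, b] idx =
      if idx % 2 = 0 then [a + ((pvEO m).1 : Int), b + ((pvEO m).2 : Int)]
      else [a + ((pvEO m).2 : Int), b + ((pvEO m).1 : Int)] := by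
  intro m
  induction m using Nat.strong_induction_on with
  | _ m ih =>
    intro a b idx hidx
    by_cases hm : m = 0
    · subst hm
      rw [evenOddBitLoop, dif_neg (by norm_num), pvEO]
      split <;> simp
    · have hmpos : 0 < m := Nat.pos_of_ne_zero hm
      rw [evenOddBitLoop]
      have hg : ((m : Int) > 0) := by exact_mod_cast hmpos
      rw [dif_pos hg]
      have hcur : PySem.Int.band (m : Int) 1 = ((m % 2 : Nat) : Int) := by
        rw [PySem.Int.band_one, pv_mod_natCast]
      have hmod : PySem.Int.mod idx 2 = idx % 2 := by
        unfold PySem.Int.mod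
        rw [Int.fmod_eq_emod]
        simp
      have hsh : ((m : Int) >>> (1 : Nat)) = ((m / 2 : Nat) : Int) := pv_int_shiftRight_natCast m
      have hpar : idx % 2 = 0 ∨ idx % 2 = 1 := by omega
      have ihh := ih (m / 2) (Nat.div_lt_self hmpos (by omega))
      rcases Nat.mod_two_eq_zero_or_one m with hm2 | hm2
      · -- current bit 0: ans unchanged
        have hne : ¬ (PySem.Int.band (m : Int) 1 == 1) = true := by
          rw [hcur, hm2]; decide
        simp only [hne, hsh]
        rw [if_neg Bool.false_ne_true, ihh a b (idx + 1) (by omega)]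
        have hEf := pvEO_fst m
        have hEs := pvEO_snd m
        rcases hpar with h0 | h1
        · rw [if_neg (by omega), if_pos h0]
          simp only [List.cons.injEq, and_true]
          constructor <;> (push_cast [hEf, hEs, hm2]; ring)
        · rw [if_pos (by omega), if_neg (by omega)]
          simp only [List.cons.injEq, and_true]
          constructor <;> (push_cast [hEf, hEs, hm2]; ring)
      · -- current bit 1: increment slot idx % 2
        have hye : (PySem.Int.band (m : Int) 1 == 1) = true := by
          rw [hcur, hm2]; decide
        simp only [hye, hsh, hmod]
        rw [if_pos trivial]
        have hEf := pvEO_fst m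
        have hEs := pvEO_snd m
        rcases hpar with h0 | h1
        · have hset : PySem.List.pySetD [a, b] (idx % 2) (PySem.List.pyGetD [a, b] (idx % 2) 0 + 1) = [a + 1, b] := by
            rw [h0]; simp [PySem.List.pySetD, PySem.List.pySet?, PySem.List.pyGetD, PySem.List.pyGet?, PySem.List.pyIdx?]
          rw [hset, ihh (a + 1) b (idx + 1) (by omega), if_neg (by omega), if_pos h0]
          simp only [List.cons.injEq, and_true]
          constructor <;> (push_cast [hEf, hEs, hm2]; ring)
        · have hset : PySem.List.pySetD [a, b] (idx % 2) (PySem.List.pyGetD [a, b] (idx % 2) 0 + 1) = [a, b + 1] := by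
            rw [h1]; simp [PySem.List.pySetD, PySem.List.pySet?, PySem.List.pyGetD, PySem.List.pyGet?, PySem.List.pyIdx?]
          rw [hset, ihh a (b + 1) (idx + 1) (by omega), if_pos (by omega), if_neg (by omega)]
          simp only [List.cons.injEq, and_true]
          constructor <;> (push_cast [hEf, hEs, hm2]; ring)

lemma pv_mask_eq (K : Nat) :
    PySem.Int.floordiv (4 ^ K - 1) 3 = ((pvAlt K : Nat) : Int) := by
  unfold PySem.Int.floordiv
  rw [Int.fdiv_eq_ediv]
  have hp : (1 : Int) ≤ 4 ^ K := one_le_pow₀ (by omega)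
  have h4 : ((4 : Nat) : Int) = 4 := by norm_num
  have hcast : (4 : Int) ^ K - 1 = (((4 ^ K - 1 : Nat)) : Int) := by
    push_cast [Nat.one_le_pow _ _ (by omega : (0:Nat) < 4)]
    ring
  rw [hcast, if_pos (Or.inl (by omega)), sub_zero, ← pvAlt_eq K]
  exact Nat.ToInt.div_congr rfl rfl

-- ===== VERDICT (by name: the statement is the Claim_ definition above) =====
theorem evenOddBit_spec : Claim_equal_evenOddBit := by
  intro n _hdom
  unfold Spec_evenOddBit evenOddBit evenOddBit_alt
  by_cases hn : n ≤ 0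
  · rw [evenOddBitLoop, dif_neg (by omega), if_pos hn]
  · have hpos : 0 < n := by omega
    rw [if_neg hn]
    have hm : ((n.toNat : Nat) : Int) = n := Int.toNat_of_nonneg (by omega)
    set m := n.toNat with hmdef
    set K := PySem.Int.bitLength n with hK
    have hmlt : m < 4 ^ K := by
      have h1 : n.natAbs < 2 ^ K := PySem.Int.lt_two_pow_bitLength n
      have h2 : (2 : Nat) ^ K ≤ 4 ^ K := Nat.pow_le_pow_left (by omega) K
      have h3 : n.natAbs = m := by omega
      omega
    have hmask : PySem.Int.floordiv (4 ^ K - 1) 3 = ((pvAlt K : Nat) : Int) := pv_mask_eq K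
    have hA : evenOddBitLoop n [0, 0] 0 = [((pvEO m).1 : Int), ((pvEO m).2 : Int)] := by
      rw [← hm, pvLoop_eq m 0 0 0 (by omega)]
      norm_num
    rw [hA]
    simp only [hmask]
    have hb1 : PySem.Int.band n ((pvAlt K : Nat) : Int) = ((m &&& pvAlt K : Nat) : Int) := by
      rw [← hm]; exact PySem.Int.band_natCast m (pvAlt K)
    have hb2 : PySem.Int.band (n >>> (1 : Nat)) ((pvAlt K : Nat) : Int) = (((m / 2) &&& pvAlt K : Nat) : Int) := by
      rw [← hm, pv_int_shiftRight_natCast m]; exact PySem.Int.band_natCast (m / 2) (pvAlt K)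
    simp only [hb1, hb2]
    rw [pvB_count K m hmlt, pvB_count K (m / 2) (by omega), ← pvEO_snd m]
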